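-- pv_equiv track=rewrite | github.com/ajith-shankar/DSA-Using-Python | Strings/LeftmostNonRepeatingChar.py | leftmostNonRepeating1
-- ===== SOURCE A (Python) =====
-- def leftmostNonRepeating1(s1):
--     for i in range(len(s1)):
--         flag = False
--         for j in range(i + 1, len(s1)):
--             if s1[i] == s1[j]:  # if char repeats then make flag=True
--                 flag = True
--                 break
--
--         if flag == False:
--             return i
--
--     return -1
-- ===== SOURCE B (Python) =====
-- def leftmostNonRepeating1(s1):
--     last = {}
--     for i, c in enumerate(s1):
--         last[c] = i
--     for i, c in enumerate(s1):
--         if last[c] == i: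
--             return i
--     return -1
-- ===== Notes on version B (the rewrite author's own statement) =====
-- stated objective: faster
-- what changed: Replaces the quadratic nested rescan (for each i, scan the rest of the string for a repeat) with a single pass building a last-occurrence-index dictionary, then a scan for the first index that IS its character's last occurrence.
import Mathlib
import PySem

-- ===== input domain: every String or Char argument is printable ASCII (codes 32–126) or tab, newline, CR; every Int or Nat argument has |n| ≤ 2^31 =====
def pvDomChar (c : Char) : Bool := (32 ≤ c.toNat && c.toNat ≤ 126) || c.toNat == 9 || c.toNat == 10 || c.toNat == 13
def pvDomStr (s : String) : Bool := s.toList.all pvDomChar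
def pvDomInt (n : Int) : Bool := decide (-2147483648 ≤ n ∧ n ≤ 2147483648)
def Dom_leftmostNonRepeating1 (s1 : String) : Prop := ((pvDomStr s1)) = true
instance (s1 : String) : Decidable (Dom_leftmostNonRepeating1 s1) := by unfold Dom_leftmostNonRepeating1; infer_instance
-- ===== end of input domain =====

-- B replaces A's quadratic rescan with a last-occurrence dictionary and a single scan (asymptotically faster).

-- ===== PORT A =====
-- for i in range(len(s1)): scan j in range(i+1, len(s1)) for a repeat ('break' = List.any);
-- early 'return i' = find?; fall-through = -1.
def leftmostNonRepeating1 (s1 : String) : Int :=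
  let cs := s1.toList
  let n : Int := PySem.Str.len s1
  match (PySem.List.pyRange 0 n 1).find? (fun i =>
      !((PySem.List.pyRange (i + 1) n 1).any (fun j =>
          PySem.List.pyGetD cs i ' ' == PySem.List.pyGetD cs j ' '))) with
  | some i => i
  | none => -1

-- ===== PORT B =====
-- last[c] = i over enumerate(s1); then first i with last[c] == i ('return i' = find?), else -1.
def leftmostNonRepeating1_alt (s1 : String) : Int :=
  let cs := s1.toList
  let last : PySem.Dict Char Int :=
    (PySem.List.enumerate cs 0).foldl (fun d p => d.insert p.2 p.1) PySem.Dict.empty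
  match (PySem.List.enumerate cs 0).find? (fun p => last.get? p.2 == some p.1) with
  | some p => p.1
  | none => -1

-- ===== PRECONDITION & SPEC =====
def Spec_leftmostNonRepeating1 (s1 : String) (out : Int) : Prop := out = leftmostNonRepeating1_alt s1
instance (s1 : String) (out : Int) : Decidable (Spec_leftmostNonRepeating1 s1 out) := by unfold Spec_leftmostNonRepeating1; infer_instance

-- ===== CLAIM (what is proved, stated in full; the proofs are below) =====
def Claim_equal_leftmostNonRepeating1 : Prop := ∀ (s1 : String), Dom_leftmostNonRepeating1 s1 → Spec_leftmostNonRepeating1 s1 (leftmostNonRepeating1 s1)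

-- ===== LEMMAS AND PROOFS =====

-- find? is determined by the predicate's values on the members
theorem find?_congr_mem {α : Type} (l : List α) (p q : α → Bool)
    (h : ∀ a ∈ l, p a = q a) : l.find? p = l.find? q := by
  induction l with
  | nil => rfl
  | cons x xs ih =>
    simp only [List.find?_cons]
    rw [h x (by simp)]
    cases q x
    · exact ih fun a ha => h a (by simp [ha])
    · rfl

-- the insert-loop dict answers with the LAST pair whose key matches
theorem foldl_insert_get? (l : List (Int × Char)) (d : PySem.Dict Char Int) (c : Char) :
    (l.foldl (fun d p => d.insert p.2 p.1) d).get? c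
      = match l.reverse.find? (fun p => p.2 == c) with
        | some p => some p.1
        | none => d.get? c := by
  induction l generalizing d with
  | nil => rfl
  | cons x xs ih =>
    simp only [List.foldl_cons, List.reverse_cons, List.find?_append]
    rw [ih]
    cases hx : xs.reverse.find? (fun p => p.2 == c) with
    | some p => simp
    | none =>
      simp only [List.find?_cons]
      rw [PySem.Dict.get?_insert]
      by_cases hbc : x.2 == c
      · have hcx : c = x.2 := (beq_iff_eq.mp hbc).symm
        simp [hcx]
      · rw [if_neg (fun h => absurd (beq_iff_eq.mpr h.symm) (by simpa using hbc))]
        simp [hbc]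

-- find? over the reversed range finds k exactly when no later index holds c
theorem revRange_find? (cs : List Char) (c : Char) (n : Nat) :
    ∀ k : Nat, k < n → cs.getD k ' ' = c →
      ((List.range n).reverse.find? (fun j => cs.getD j ' ' == c) = some k
        ↔ ∀ j, k < j → j < n → cs.getD j ' ' ≠ c) := by
  induction n with
  | zero => intro k hk; omega
  | succ n ih =>
    intro k hk hkc
    have hrev : (List.range (n + 1)).reverse = n :: (List.range n).reverse := by
      simp [List.range_succ]
    rw [hrev, List.find?_cons]
    by_cases hn : cs.getD n ' ' = c
    · simp only [show (cs.getD n ' ' == c) = true from beq_iff_eq.mpr hn]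
      constructor
      · intro h j hj1 hj2
        have : n = k := by simpa using h
        omega
      · intro h
        have : k = n := by
          by_contra hne
          exact h n (by omega) (by omega) hn
        simp [this]
    · simp only [show (cs.getD n ' ' == c) = false from beq_eq_false_iff_ne.mpr hn]
      have hk' : k < n := by
        rcases Nat.lt_succ_iff_lt_or_eq.mp hk with h | h
        · exact h
        · exact absurd hkc (h ▸ hn)
      rw [ih k hk' hkc]
      constructor
      · intro h j hj1 hj2
        rcases Nat.lt_succ_iff_lt_or_eq.mp hj2 with h2 | h2
        · exact h j hj1 h2
        · exact h2 ▸ hn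
      · intro h j hj1 hj2
        exact h j hj1 (by omega)

-- membership in a drop, phrased with indices and getD
theorem mem_drop_iff_getD (cs : List Char) (k : Nat) (c : Char) :
    c ∈ cs.drop (k + 1) ↔ ∃ j, k < j ∧ j < cs.length ∧ cs.getD j ' ' = c := by
  rw [List.mem_iff_getElem]
  constructor
  · rintro ⟨i, hi, rfl⟩
    have hlen : k + 1 + i < cs.length := by
      have := hi; simp [List.length_drop] at this; omega
    refine ⟨k + 1 + i, by omega, hlen, ?_⟩
    rw [List.getD_eq_getElem cs ' ' hlen, ← List.getElem_drop]
  · rintro ⟨j, hj1, hj2, hj3⟩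
    refine ⟨j - (k + 1), by simp [List.length_drop]; omega, ?_⟩
    rw [List.getElem_drop]
    rw [List.getD_eq_getElem cs ' ' hj2] at hj3
    simp only [show k + 1 + (j - (k + 1)) = j by omega]
    exact hj3

-- the two per-index tests agree
theorem pred_agree (cs : List Char) (k : Nat) (hk : k < cs.length) :
    (!((PySem.List.pyRange ((k : Int) + 1) (cs.length : Int) 1).any (fun j =>
        PySem.List.pyGetD cs (k : Int) ' ' == PySem.List.pyGetD cs j ' ')))
      = (((PySem.List.enumerate cs 0).foldl (fun d p => d.insert p.2 p.1)
            PySem.Dict.empty).get? (cs.getD k ' ') == some ((k : Int))) := by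
  set c := cs.getD k ' ' with hc
  -- A side: the inner any is membership of c in the tail
  have hA : ((PySem.List.pyRange ((k : Int) + 1) (cs.length : Int) 1).any (fun j =>
        PySem.List.pyGetD cs (k : Int) ' ' == PySem.List.pyGetD cs j ' '))
      = (cs.drop (k + 1)).any (fun x => c == x) := by
    rw [show (fun j => PySem.List.pyGetD cs ((k : Int)) ' ' == PySem.List.pyGetD cs j ' ')
        = ((fun x => PySem.List.pyGetD cs ((k : Int)) ' ' == x)
            ∘ (fun j => PySem.List.pyGetD cs j ' ')) from rfl]
    rw [← List.any_map]
    have h1 : ((k : Int) + 1) = ((k + 1 : Nat) : Int) := by push_cast; ring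
    rw [h1, PySem.List.map_pyGetD_pyRange' cs ' ' (by positivity)]
    simp [PySem.List.pyGetD_natCast, hc]
  -- B side: the dict lookup is the reversed-range search
  have hB : ((PySem.List.enumerate cs 0).foldl (fun d p => d.insert p.2 p.1)
        PySem.Dict.empty).get? c
      = ((List.range cs.length).reverse.find? (fun j => cs.getD j ' ' == c)).map
          (fun (k : Nat) => ((k : Int))) := by
    rw [foldl_insert_get?]
    have henum : (PySem.List.enumerate cs 0).reverse
        = ((List.range cs.length).reverse.map (fun (k : Nat) => (((k : Int)), cs.getD k ' '))) := by
      have := PySem.List.enumerate_eq_map_pyRange (xs := cs) (d := ' ')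
      rw [this]
      simp only [PySem.List.len]
      rw [PySem.List.pyRange_zero]
      simp only [Int.toNat_natCast, List.map_map, List.map_reverse]
      congr 1
      apply List.map_congr_left
      intro a ha
      simp [PySem.List.pyGetD_natCast]
    rw [henum, List.find?_map]
    have hco : ((fun p => p.2 == c) ∘ fun (k : Nat) => (((k : Int)), cs.getD k ' '))
        = fun j => cs.getD j ' ' == c := rfl
    rw [hco]
    cases hfind : (List.range cs.length).reverse.find? (fun j => cs.getD j ' ' == c) with
    | none => simp [PySem.Dict.get?_empty]
    | some m => simp
  rw [hA, hB]
  -- now both sides are decidable statements about later occurrences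
  apply Bool.eq_iff_iff.mpr
  rw [Bool.not_eq_true', ← Bool.not_eq_true]
  rw [List.any_eq_true]
  constructor
  · intro h
    have hno : ¬ ∃ j, k < j ∧ j < cs.length ∧ cs.getD j ' ' = c := by
      intro ⟨j, hj1, hj2, hj3⟩
      exact h ⟨c, (mem_drop_iff_getD cs k c).mpr ⟨j, hj1, hj2, hj3⟩, by simp⟩
    have : (List.range cs.length).reverse.find? (fun j => cs.getD j ' ' == c) = some k := by
      rw [revRange_find? cs c cs.length k hk hc.symm]
      intro j hj1 hj2 hj3
      exact hno ⟨j, hj1, hj2, hj3⟩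
    rw [this]
    simp
  · intro h ⟨x, hx, hbeq⟩
    have hxc : c = x := beq_iff_eq.mp hbeq
    obtain ⟨j, hj1, hj2, hj3⟩ := (mem_drop_iff_getD cs k c).mp (hxc ▸ hx)
    cases hfind : (List.range cs.length).reverse.find? (fun j => cs.getD j ' ' == c) with
    | none => rw [hfind] at h; simp at h
    | some m =>
      rw [hfind] at h
      simp only [Option.map_some, Option.some.injEq, beq_iff_eq] at h
      have hm : m = k := by exact_mod_cast h
      rw [hm] at hfind
      rw [revRange_find? cs c cs.length k hk hc.symm] at hfind
      exact hfind j hj1 hj2 hj3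

-- match-shape bridge for the two tails
theorem match_opt (o : Option Nat) (g : Nat → Char) :
    (match o.map (fun (k : Nat) => ((k : Int))) with | some i => i | none => (-1 : Int))
      = (match o.map (fun (k : Nat) => (((k : Int)), g k)) with | some p => p.1 | none => -1) := by
  cases o <;> rfl

-- ===== VERDICT (by name: the statement is the Claim_ definition above) =====
theorem leftmostNonRepeating1_spec : Claim_equal_leftmostNonRepeating1 := by
  intro s1 _
  unfold Spec_leftmostNonRepeating1 leftmostNonRepeating1 leftmostNonRepeating1_alt
  set cs := s1.toList with hcs
  simp only [PySem.Str.len_eq, ← hcs]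
  have hrangeA : PySem.List.pyRange 0 (cs.length : Int) 1
      = (List.range cs.length).map (fun (k : Nat) => ((k : Int))) := by
    rw [PySem.List.pyRange_zero]; simp
  have henum : PySem.List.enumerate cs 0
      = (List.range cs.length).map (fun (k : Nat) => (((k : Int)), cs.getD k ' ')) := by
    have := PySem.List.enumerate_eq_map_pyRange (xs := cs) (d := ' ')
    rw [this]
    simp only [PySem.List.len]
    rw [PySem.List.pyRange_zero]
    simp only [Int.toNat_natCast, List.map_map]
    apply List.map_congr_left
    intro a ha
    simp [PySem.List.pyGetD_natCast]
  rw [hrangeA]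
  conv_rhs => rw [henum]
  rw [List.find?_map, List.find?_map]
  rw [find?_congr_mem (List.range cs.length)
    ((fun i => !((PySem.List.pyRange (i + 1) (cs.length : Int) 1).any (fun j =>
        PySem.List.pyGetD cs i ' ' == PySem.List.pyGetD cs j ' ')))
      ∘ (fun (k : Nat) => ((k : Int))))
    ((fun p => (((List.range cs.length).map (fun (k : Nat) => (((k : Int)), cs.getD k ' '))).foldl
          (fun d p => d.insert p.2 p.1) PySem.Dict.empty).get? p.2 == some p.1)
      ∘ (fun (k : Nat) => (((k : Int)), cs.getD k ' ')))
    (by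
      intro k hk
      have hk' : k < cs.length := List.mem_range.mp hk
      rw [← henum]
      exact pred_agree cs k hk')]
  exact match_opt _ _
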